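-- pv_equiv track=rewrite | github.com/Sanssssssssssssssss/erp-approval-agent | src/backend/domains/erp_approval/service.py | _preferred_citations
-- ===== SOURCE A (Python) =====
-- def _preferred_citations(source_ids: list[str], keywords: tuple[str, ...]) -> list[str]:
--     selected: list[str] = []
--     for keyword in keywords:
--         for source_id in source_ids:
--             if keyword in source_id and source_id not in selected:
--                 selected.append(source_id)
--     if selected:
--         return selected
--     return source_ids[:3]
-- ===== SOURCE B (Python) =====
-- def _preferred_citations(source_ids: list[str], keywords: tuple[str, ...]) -> list[str]:
--     # One pass over source_ids: bucket each new id under the index of the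
--     # first keyword it contains, then concatenate the buckets in keyword order.
--     buckets = [[] for _ in keywords]
--     seen = set()
--     for sid in source_ids:
--         if sid in seen:
--             continue
--         seen.add(sid)
--         for j, kw in enumerate(keywords):
--             if kw in sid:
--                 buckets[j].append(sid)
--                 break
--     result = [sid for bucket in buckets for sid in bucket]
--     return result if result else source_ids[:3]
-- ===== Notes on version B (the rewrite author's own statement) =====
-- stated objective: faster
-- what changed: Replaces A's keyword-outer nested rescans of source_ids with linear-scan membership tests on the growing selected list by a single pass over source_ids that buckets each new id under its first matching keyword (hash set for dedup), then concatenates the buckets.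
import Mathlib
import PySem

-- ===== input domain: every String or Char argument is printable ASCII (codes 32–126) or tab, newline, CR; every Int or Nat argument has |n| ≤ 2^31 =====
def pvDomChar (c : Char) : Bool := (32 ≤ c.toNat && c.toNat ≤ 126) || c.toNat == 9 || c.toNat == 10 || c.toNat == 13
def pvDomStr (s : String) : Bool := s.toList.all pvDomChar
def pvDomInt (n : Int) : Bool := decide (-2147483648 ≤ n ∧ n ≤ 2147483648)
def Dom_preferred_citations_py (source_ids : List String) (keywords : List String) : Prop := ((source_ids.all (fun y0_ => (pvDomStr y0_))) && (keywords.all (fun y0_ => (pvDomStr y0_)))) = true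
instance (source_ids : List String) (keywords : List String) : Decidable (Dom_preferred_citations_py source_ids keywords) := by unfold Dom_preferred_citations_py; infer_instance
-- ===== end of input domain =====

-- B replaces A's keyword-outer nested rescans of source_ids by a single pass over
-- source_ids that buckets each new id under its first matching keyword (alternative
-- decomposition, same return value; neither version mutates its arguments).

-- ===== PORT A =====
def preferred_citations_py (source_ids : List String) (keywords : List String) : List String :=
  let selected : List String :=
    keywords.foldl (fun selected keyword =>
      source_ids.foldl (fun selected source_id =>
        if PySem.Str.isIn keyword source_id && !selected.contains source_id then
          selected ++ [source_id]
        else selected) selected) []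
  if selected.isEmpty then PySem.List.slice source_ids none (some 3) else selected

-- ===== PORT B =====
-- inner `for j, kw in enumerate(keywords): if kw in sid: …; break` of Source B
def pcFirstKw (sid : String) : List String → Nat → Option Nat
  | [], _ => none
  | kw :: rest, j => if PySem.Str.isIn kw sid then some j else pcFirstKw sid rest (j + 1)

-- body of Source B's `for sid in source_ids` loop: state = (buckets, seen)
def pcStep (keywords : List String) (st : List (List String) × PySem.Set String) (sid : String) :
    List (List String) × PySem.Set String :=
  if PySem.Set.contains st.2 sid then st
  else
    let seen := PySem.Set.add st.2 sid
    match pcFirstKw sid keywords 0 with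
    | some j => (st.1.modify j (· ++ [sid]), seen)
    | none => (st.1, seen)

def preferred_citations_py_alt (source_ids : List String) (keywords : List String) : List String :=
  let res := source_ids.foldl (pcStep keywords) (keywords.map (fun _ => []), PySem.Set.empty)
  let result := res.1.flatten
  if result.isEmpty then PySem.List.slice source_ids none (some 3) else result

-- ===== PRECONDITION & SPEC =====
def Spec_preferred_citations_py (source_ids : List String) (keywords : List String) (out : List String) : Prop := out = preferred_citations_py_alt source_ids keywords
instance (source_ids : List String) (keywords : List String) (out : List String) : Decidable (Spec_preferred_citations_py source_ids keywords out) := by unfold Spec_preferred_citations_py; infer_instance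

-- ===== CLAIM (what is proved, stated in full; the proofs are below) =====
def Claim_equal_preferred_citations_py : Prop := ∀ (source_ids : List String) (keywords : List String), Dom_preferred_citations_py source_ids keywords → Spec_preferred_citations_py source_ids keywords (preferred_citations_py source_ids keywords)

-- ===== LEMMAS AND PROOFS =====

theorem pcFirstKw_shift (a : String) (kws : List String) (j : Nat) :
    pcFirstKw a kws j = (pcFirstKw a kws 0).map (· + j) := by
  induction kws generalizing j with
  | nil => simp [pcFirstKw]
  | cons kw rest ih =>
    simp only [pcFirstKw]
    by_cases h : PySem.Chars.isIn kw.toList a.toList = true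
    · simp [h]
    · simp only [PySem.Str.isIn_eq, h, if_false, Bool.false_eq_true]
      rw [ih (j + 1), ih 1]
      cases pcFirstKw a rest 0 <;> simp <;> omega

theorem pcFirstKw_bounds {a : String} {kws : List String} {j i : Nat}
    (h : pcFirstKw a kws j = some i) : j ≤ i ∧ i < j + kws.length := by
  induction kws generalizing j with
  | nil => simp [pcFirstKw] at h
  | cons kw rest ih =>
    simp only [pcFirstKw] at h
    by_cases hc : PySem.Chars.isIn kw.toList a.toList = true
    · simp [hc] at h; simp; omega
    · simp only [PySem.Str.isIn_eq, hc, if_false, Bool.false_eq_true] at h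
      have := ih h
      simp only [List.length_cons]
      omega

theorem pcFirstKw_append (a : String) (l1 l2 : List String) :
    pcFirstKw a (l1 ++ l2) 0 =
      match pcFirstKw a l1 0 with
      | some i => some i
      | none => (pcFirstKw a l2 0).map (· + l1.length) := by
  induction l1 with
  | nil => simp [pcFirstKw]
  | cons x l1' ih =>
    simp only [List.cons_append, pcFirstKw]
    by_cases hc : PySem.Chars.isIn x.toList a.toList = true
    · simp [hc]
    · simp only [PySem.Str.isIn_eq, hc, if_false, Bool.false_eq_true]
      rw [pcFirstKw_shift a (l1' ++ l2) 1, ih, pcFirstKw_shift a l1' 1]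
      cases h1 : pcFirstKw a l1' 0 with
      | some i => simp
      | none =>
        simp only [Option.map_none]
        cases pcFirstKw a l2 0 <;> simp <;> omega

theorem pcRank_some_isIn {keywords : List String} {j0 : Nat} {kw : String} {rest : List String}
    (hdrop : keywords.drop j0 = kw :: rest) {a : String}
    (h : pcFirstKw a keywords 0 = some j0) : PySem.Str.isIn kw a = true := by
  have hL := congrArg List.length hdrop
  simp at hL
  have hlen : (keywords.take j0).length = j0 := by simp [List.length_take]; omega
  have hsplit : keywords = keywords.take j0 ++ (kw :: rest) := by
    conv_lhs => rw [← List.take_append_drop j0 keywords]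
    rw [hdrop]
  rw [hsplit, pcFirstKw_append] at h
  cases h1 : pcFirstKw a (keywords.take j0) 0 with
  | some i =>
    rw [h1] at h
    have := pcFirstKw_bounds h1
    simp at h; omega
  | none =>
    rw [h1] at h
    simp only [hlen] at h
    cases h2 : pcFirstKw a (kw :: rest) 0 with
    | none => rw [h2] at h; simp at h
    | some m =>
      rw [h2] at h
      simp at h
      have hm : m = 0 := by omega
      subst hm
      simp only [pcFirstKw] at h2
      by_cases hc : PySem.Chars.isIn kw.toList a.toList = true
      · simpa using hc
      · simp only [PySem.Str.isIn_eq, hc, if_false, Bool.false_eq_true] at h2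
        have := pcFirstKw_bounds h2
        omega

theorem pcRank_isIn_le {keywords : List String} {j0 : Nat} {kw : String} {rest : List String}
    (hdrop : keywords.drop j0 = kw :: rest) {a : String}
    (hc : PySem.Str.isIn kw a = true) :
    ∃ i, pcFirstKw a keywords 0 = some i ∧ i ≤ j0 := by
  have hL := congrArg List.length hdrop
  simp at hL
  have hlen : (keywords.take j0).length = j0 := by simp [List.length_take]; omega
  have hsplit : keywords = keywords.take j0 ++ (kw :: rest) := by
    conv_lhs => rw [← List.take_append_drop j0 keywords]
    rw [hdrop]
  rw [hsplit, pcFirstKw_append]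
  cases h1 : pcFirstKw a (keywords.take j0) 0 with
  | some i =>
    refine ⟨i, rfl, ?_⟩
    have := pcFirstKw_bounds h1
    omega
  | none =>
    refine ⟨j0, ?_, le_refl _⟩
    rw [PySem.Str.isIn_eq] at hc
    simp [pcFirstKw, hc, hlen]

theorem pcRank_not_some_not_isIn {keywords : List String} {j0 : Nat} {kw : String} {rest : List String}
    (hdrop : keywords.drop j0 = kw :: rest) {a : String}
    (h : ∀ i ≤ j0, pcFirstKw a keywords 0 ≠ some i) : PySem.Str.isIn kw a = false := by
  by_cases hc : PySem.Str.isIn kw a = true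
  · obtain ⟨i, hi, hle⟩ := pcRank_isIn_le hdrop hc
    exact absurd hi (h i hle)
  · simpa using hc

def pcFO (S : List String) : List String → List String
  | [] => []
  | a :: t => if a ∈ S then pcFO S t else a :: pcFO (S ++ [a]) t

def pcAddAll (B : List (List String)) (g : Nat → List String) : List (List String) :=
  B.mapIdx (fun j b => b ++ g j)

theorem pcAddAll_nil (B : List (List String)) : pcAddAll B (fun _ => []) = B := by
  apply List.ext_getElem <;> simp [pcAddAll]

theorem pcAddAll_congr (B : List (List String)) {g g' : Nat → List String}
    (h : ∀ i, g i = g' i) : pcAddAll B g = pcAddAll B g' := by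
  simp only [pcAddAll]; congr 1; funext j b; rw [h j]

theorem pcAddAll_modify (B : List (List String)) (j : Nat) (hj : j < B.length)
    (a : String) (g : Nat → List String) :
    pcAddAll (B.modify j (· ++ [a])) g = pcAddAll B (fun i => if i = j then a :: g i else g i) := by
  apply List.ext_getElem
  · simp [pcAddAll]
  · intro i h1 h2
    simp only [pcAddAll, List.getElem_mapIdx, List.getElem_modify]
    by_cases hij : i = j
    · simp [hij]
    · simp [hij, show ¬(j = i) from fun h => hij h.symm]

theorem pcFold (keywords : List String) (xs : List String) :
    ∀ (B : List (List String)) (S : PySem.Set String), B.length = keywords.length →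
    (xs.foldl (pcStep keywords) (B, S)).1 =
      pcAddAll B (fun j => (pcFO S xs).filter (fun s => decide (pcFirstKw s keywords 0 = some j))) := by
  induction xs with
  | nil => intro B S hB; simp [pcFO, pcAddAll_nil]
  | cons a t ih =>
    intro B S hB
    simp only [List.foldl_cons, pcFO]
    by_cases hm : a ∈ S
    · have hc : PySem.Set.contains S a = true := (PySem.Set.contains_iff S a).2 hm
      simp only [pcStep, hc, if_pos]
      rw [if_pos hm, ih B S hB]
    · have hc : PySem.Set.contains S a = false := by
        by_cases h : PySem.Set.contains S a = true
        · exact absurd ((PySem.Set.contains_iff S a).1 h) hm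
        · simpa using h
      have hadd : PySem.Set.add S a = S ++ [a] := PySem.Set.add_of_not_mem hm
      rw [if_neg hm]
      simp only [pcStep, hc, Bool.false_eq_true, if_false]
      cases hr : pcFirstKw a keywords 0 with
      | none =>
        simp only [hadd]
        rw [ih B (S ++ [a]) hB]
        apply pcAddAll_congr
        intro i
        rw [List.filter_cons_of_neg (by simp [hr])]
      | some j =>
        simp only [hadd]
        have hj : j < keywords.length := by
          have := pcFirstKw_bounds hr
          omega
        rw [ih _ (S ++ [a]) (by simp [List.length_modify, hB])]
        rw [pcAddAll_modify B j (by omega)]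
        apply pcAddAll_congr
        intro i
        by_cases hij : i = j
        · subst hij
          rw [if_pos rfl, List.filter_cons_of_pos (by simp [hr])]
        · rw [if_neg hij, List.filter_cons_of_neg (by simp [hr]; omega)]

def pcNew (kw : String) (S : List String) : List String → List String
  | [] => []
  | a :: t =>
    if PySem.Str.isIn kw a && !S.contains a then a :: pcNew kw (S ++ [a]) t else pcNew kw S t

theorem pcInner_eq (kw : String) (xs : List String) : ∀ S : List String,
    xs.foldl (fun selected source_id =>
      if PySem.Str.isIn kw source_id && !selected.contains source_id then
        selected ++ [source_id]
      else selected) S = S ++ pcNew kw S xs := by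
  induction xs with
  | nil => intro S; simp [pcNew]
  | cons a t ih =>
    intro S
    simp only [List.foldl_cons, pcNew]
    by_cases hc : (PySem.Str.isIn kw a && !S.contains a) = true
    · rw [if_pos hc, if_pos hc, ih]; simp
    · rw [if_neg hc, if_neg hc, ih]

theorem pcNew_eq_filter {keywords : List String} {j0 : Nat} {kw : String} {rest : List String}
    (hdrop : keywords.drop j0 = kw :: rest) (xs : List String) : ∀ (S L : List String),
    (∀ a ∈ xs, (a ∈ S ↔ ((∃ i, pcFirstKw a keywords 0 = some i ∧ i < j0) ∨
        (a ∈ L ∧ pcFirstKw a keywords 0 = some j0)))) →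
    pcNew kw S xs = (pcFO L xs).filter (fun s => decide (pcFirstKw s keywords 0 = some j0)) := by
  induction xs with
  | nil => intro S L _; simp [pcNew, pcFO]
  | cons a t ih =>
    intro S L H
    have Ha := H a (List.mem_cons_self)
    have Ht : ∀ b ∈ t, (b ∈ S ↔ _) := fun b hb => H b (List.mem_cons_of_mem _ hb)
    simp only [pcNew, pcFO]
    by_cases hmL : a ∈ L
    · -- a already recorded in L: both sides skip it
      rw [if_pos hmL]
      have hskip : (PySem.Str.isIn kw a && !S.contains a) = false := by
        cases hr : pcFirstKw a keywords 0 with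
        | none =>
          have : PySem.Str.isIn kw a = false :=
            pcRank_not_some_not_isIn hdrop (by simp [hr])
          rw [this]; simp
        | some i =>
          rcases Nat.lt_trichotomy i j0 with hlt | heq | hgt
          · have haS : a ∈ S := Ha.2 (Or.inl ⟨i, hr, hlt⟩)
            simp [haS]
          · subst heq
            have haS : a ∈ S := Ha.2 (Or.inr ⟨hmL, hr⟩)
            simp [haS]
          · have : PySem.Str.isIn kw a = false := by
              apply pcRank_not_some_not_isIn hdrop
              intro i' hi' he
              rw [hr] at he
              simp at he
              omega
            rw [this]; simp
      simp only [hskip, Bool.false_eq_true, if_false]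
      exact ih S L (fun b hb => H b (List.mem_cons_of_mem _ hb))
    · rw [if_neg hmL]
      cases hr : pcFirstKw a keywords 0 with
      | none =>
        have hcf : PySem.Str.isIn kw a = false :=
          pcRank_not_some_not_isIn hdrop (by simp [hr])
        have hno : (PySem.Str.isIn kw a && !S.contains a) = false := by rw [hcf]; simp
        simp only [hno, Bool.false_eq_true, if_false]
        rw [List.filter_cons_of_neg (by simp [hr])]
        apply ih S (L ++ [a])
        intro b hb
        rw [Ht b hb]
        constructor
        · rintro (h | ⟨h1, h2⟩)
          · exact Or.inl h
          · exact Or.inr ⟨by simp [h1], h2⟩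
        · rintro (h | ⟨h1, h2⟩)
          · exact Or.inl h
          · rcases List.mem_append.1 h1 with h1 | h1
            · exact Or.inr ⟨h1, h2⟩
            · simp at h1; subst h1; rw [hr] at h2; simp at h2
      | some i =>
        rcases Nat.lt_trichotomy i j0 with hlt | heq | hgt
        · -- a already selected at an earlier keyword
          have haS : a ∈ S := Ha.2 (Or.inl ⟨i, hr, hlt⟩)
          have hno : (PySem.Str.isIn kw a && !S.contains a) = false := by
            simp [haS]
          simp only [hno, Bool.false_eq_true, if_false]
          rw [List.filter_cons_of_neg (by simp [hr]; omega)]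
          apply ih S (L ++ [a])
          intro b hb
          rw [Ht b hb]
          constructor
          · rintro (h | ⟨h1, h2⟩)
            · exact Or.inl h
            · exact Or.inr ⟨by simp [h1], h2⟩
          · rintro (h | ⟨h1, h2⟩)
            · exact Or.inl h
            · rcases List.mem_append.1 h1 with h1 | h1
              · exact Or.inr ⟨h1, h2⟩
              · simp at h1; subst h1
                exact Or.inl ⟨j0, h2, by rw [hr] at h2; simp at h2; omega⟩
        · -- a is picked now
          subst heq
          have hcT : PySem.Str.isIn kw a = true := pcRank_some_isIn hdrop hr
          have haS : a ∉ S := by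
            intro h
            rcases Ha.1 h with ⟨i', hi', hlt'⟩ | ⟨h1, _⟩
            · rw [hr] at hi'; simp at hi'; omega
            · exact hmL h1
          have hyes : (PySem.Str.isIn kw a && !S.contains a) = true := by
            rw [hcT]; simp [haS]
          simp only [hyes, if_true]
          rw [List.filter_cons_of_pos (by simp [hr])]
          congr 1
          apply ih (S ++ [a]) (L ++ [a])
          intro b hb
          constructor
          · intro hbS
            rcases List.mem_append.1 hbS with h1 | h1
            · rcases (Ht b hb).1 h1 with h | ⟨h2, h3⟩
              · exact Or.inl h
              · exact Or.inr ⟨by simp [h2], h3⟩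
            · simp at h1; subst h1
              exact Or.inr ⟨by simp, hr⟩
          · rintro (h | ⟨h1, h2⟩)
            · exact List.mem_append.2 (Or.inl ((Ht b hb).2 (Or.inl h)))
            · rcases List.mem_append.1 h1 with h1 | h1
              · exact List.mem_append.2 (Or.inl ((Ht b hb).2 (Or.inr ⟨h1, h2⟩)))
              · simp at h1; subst h1; simp
        · -- first matching keyword of a is later: kw does not occur in a
          have hcf : PySem.Str.isIn kw a = false := by
            apply pcRank_not_some_not_isIn hdrop
            intro i' hi' he
            rw [hr] at he
            simp at he
            omega
          have hno : (PySem.Str.isIn kw a && !S.contains a) = false := by rw [hcf]; simp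
          simp only [hno, Bool.false_eq_true, if_false]
          rw [List.filter_cons_of_neg (by simp [hr]; omega)]
          apply ih S (L ++ [a])
          intro b hb
          rw [Ht b hb]
          constructor
          · rintro (h | ⟨h1, h2⟩)
            · exact Or.inl h
            · exact Or.inr ⟨by simp [h1], h2⟩
          · rintro (h | ⟨h1, h2⟩)
            · exact Or.inl h
            · rcases List.mem_append.1 h1 with h1 | h1
              · exact Or.inr ⟨h1, h2⟩
              · simp at h1; subst h1; rw [hr] at h2; simp at h2; omega

def pcGrp (source_ids keywords : List String) (j : Nat) : List String :=
  (pcFO [] source_ids).filter (fun s => decide (pcFirstKw s keywords 0 = some j))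

def pcFlat (source_ids keywords : List String) (k : Nat) : List String :=
  ((List.range k).map (pcGrp source_ids keywords)).flatten

theorem pcFO_mem {a : String} (xs : List String) : ∀ S, a ∈ pcFO S xs ↔ a ∈ xs ∧ a ∉ S := by
  induction xs with
  | nil => simp [pcFO]
  | cons x t ih =>
    intro S
    simp only [pcFO]
    by_cases hx : x ∈ S
    · rw [if_pos hx, ih]
      constructor
      · rintro ⟨h1, h2⟩; exact ⟨List.mem_cons_of_mem _ h1, h2⟩
      · rintro ⟨h1, h2⟩
        rcases List.mem_cons.1 h1 with h | h
        · subst h; exact absurd hx h2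
        · exact ⟨h, h2⟩
    · rw [if_neg hx]
      simp only [List.mem_cons, ih]
      constructor
      · rintro (h | ⟨h1, h2⟩)
        · subst h; exact ⟨Or.inl rfl, hx⟩
        · simp at h2; exact ⟨Or.inr h1, h2.1⟩
      · rintro ⟨h1 | h1, h2⟩
        · exact Or.inl h1
        · by_cases hax : a = x
          · exact Or.inl hax
          · exact Or.inr ⟨h1, by simp [h2, hax]⟩

theorem mem_pcFlat {a : String} {source_ids keywords : List String} {k : Nat} :
    a ∈ pcFlat source_ids keywords k ↔
      a ∈ source_ids ∧ ∃ i, pcFirstKw a keywords 0 = some i ∧ i < k := by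
  simp only [pcFlat, List.mem_flatten, List.mem_map, List.mem_range, pcGrp]
  constructor
  · rintro ⟨l, ⟨j, hj, rfl⟩, hm⟩
    have := List.mem_filter.1 hm
    rcases this with ⟨h1, h2⟩
    simp at h2
    exact ⟨((pcFO_mem source_ids []).1 h1).1, j, h2, hj⟩
  · rintro ⟨hsrc, i, hi, hik⟩
    refine ⟨_, ⟨i, hik, rfl⟩, List.mem_filter.2 ⟨(pcFO_mem source_ids []).2 ⟨hsrc, by simp⟩, by simp [hi]⟩⟩

theorem pcFlat_succ (source_ids keywords : List String) (j : Nat) :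
    pcFlat source_ids keywords (j + 1) =
      pcFlat source_ids keywords j ++ pcGrp source_ids keywords j := by
  simp [pcFlat, List.range_succ]

theorem pcOuter (source_ids keywords : List String) : ∀ (rest : List String) (j0 : Nat),
    keywords.drop j0 = rest → j0 ≤ keywords.length →
    rest.foldl (fun selected keyword =>
      source_ids.foldl (fun selected source_id =>
        if PySem.Str.isIn keyword source_id && !selected.contains source_id then
          selected ++ [source_id]
        else selected) selected) (pcFlat source_ids keywords j0)
      = pcFlat source_ids keywords keywords.length := by
  intro rest
  induction rest with
  | nil =>
    intro j0 hdrop hle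
    have hL := congrArg List.length hdrop
    simp at hL
    have : j0 = keywords.length := by omega
    subst this
    simp
  | cons kw rest' ih =>
    intro j0 hdrop hle
    have hL := congrArg List.length hdrop
    simp at hL
    simp only [List.foldl_cons]
    rw [pcInner_eq]
    rw [pcNew_eq_filter hdrop source_ids (pcFlat source_ids keywords j0) []
      (fun a ha => by
        rw [mem_pcFlat]
        constructor
        · rintro ⟨_, i, hi, hik⟩; exact Or.inl ⟨i, hi, hik⟩
        · rintro (⟨i, hi, hik⟩ | ⟨h1, _⟩)
          · exact ⟨ha, i, hi, hik⟩
          · simp at h1)]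
    rw [show (pcFO [] source_ids).filter (fun s => decide (pcFirstKw s keywords 0 = some j0))
        = pcGrp source_ids keywords j0 from rfl, ← pcFlat_succ]
    have hdrop' : keywords.drop (j0 + 1) = rest' := by
      have h1 : keywords.drop (j0 + 1) = (keywords.drop j0).drop 1 := by
        rw [List.drop_drop]
      rw [h1, hdrop]
      rfl
    exact ih (j0 + 1) hdrop' (by omega)


theorem pcAddAll_nils (keywords : List String) (g : Nat → List String) :
    pcAddAll (keywords.map (fun _ => ([] : List String))) g = (List.range keywords.length).map g := by
  apply List.ext_getElem <;> simp [pcAddAll]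

-- ===== VERDICT (by name: the statement is the Claim_ definition above) =====
theorem preferred_citations_py_spec : Claim_equal_preferred_citations_py := by
  intro source_ids keywords _
  unfold Spec_preferred_citations_py preferred_citations_py preferred_citations_py_alt
  have hA : keywords.foldl (fun selected keyword =>
      source_ids.foldl (fun selected source_id =>
        if PySem.Str.isIn keyword source_id && !selected.contains source_id then
          selected ++ [source_id]
        else selected) selected) [] = pcFlat source_ids keywords keywords.length := by
    have := pcOuter source_ids keywords keywords 0 (by simp) (Nat.zero_le _)
    simpa [pcFlat] using this
  have hB : (source_ids.foldl (pcStep keywords)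
      (keywords.map (fun _ => []), PySem.Set.empty)).1.flatten
      = pcFlat source_ids keywords keywords.length := by
    rw [pcFold keywords source_ids _ _ (by simp), pcAddAll_nils]
    rfl
  simp only [hA, hB]
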